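-- pv_equiv track=rewrite | github.com/Bluee123/Python-examples | e1.py | replace_even_odd_occurrences
-- ===== SOURCE A (Python) =====
-- def replace_even_odd_occurrences(text, word, even_replace, odd_replace):
--     words = text.split()
--     count = 0
--     for i in range(len(words)):
--         if words[i] == word:
--             count += 1
--             if count % 2 == 0:
--                 words[i] = even_replace
--             else:
--                 words[i] = odd_replace
--     return ' '.join(words)
-- ===== SOURCE B (Python) =====
-- def replace_even_odd_occurrences(text, word, even_replace, odd_replace):
--     # Divide and conquer: process(ws, c) returns (processed list, number of
--     # occurrences of `word` in ws), where c is the occurrence count seen before ws.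
--     # Correct because the parity of an occurrence depends only on how many
--     # occurrences precede it, and the left half contributes exactly its count.
--     def process(ws, c):
--         if not ws:
--             return [], 0
--         if len(ws) == 1:
--             if ws[0] == word:
--                 return [even_replace if (c + 1) % 2 == 0 else odd_replace], 1
--             return [ws[0]], 0
--         m = len(ws) // 2
--         left, nl = process(ws[:m], c)
--         right, nr = process(ws[m:], c + nl)
--         return left + right, nl + nr
--     return ' '.join(process(text.split(), 0)[0])
-- ===== Notes on version B (the rewrite author's own statement) =====
-- stated objective: alternative
-- what changed: B replaces A's linear indexed loop with a mutable counter by a divide-and-conquer recursion: split the word list in half, process each half recursively, each call returning the processed half together with its occurrence count, which offsets the parity of the right half.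
import Mathlib
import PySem

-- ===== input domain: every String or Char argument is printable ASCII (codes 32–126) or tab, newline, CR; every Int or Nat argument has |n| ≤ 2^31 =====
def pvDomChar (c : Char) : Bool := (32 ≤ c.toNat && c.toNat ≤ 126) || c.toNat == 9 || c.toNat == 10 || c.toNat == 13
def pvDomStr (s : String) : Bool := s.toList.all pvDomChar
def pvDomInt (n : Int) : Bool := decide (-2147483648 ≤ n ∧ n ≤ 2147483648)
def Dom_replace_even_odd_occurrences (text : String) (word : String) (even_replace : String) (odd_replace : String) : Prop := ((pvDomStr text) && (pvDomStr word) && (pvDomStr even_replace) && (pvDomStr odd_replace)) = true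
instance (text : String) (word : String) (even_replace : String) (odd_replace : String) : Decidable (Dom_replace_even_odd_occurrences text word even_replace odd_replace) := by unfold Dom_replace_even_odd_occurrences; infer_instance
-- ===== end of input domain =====

-- B replaces A's linear indexed loop + mutable counter by a divide-and-conquer
-- recursion returning (processed half, occurrence count); alternative decomposition, not faster.

-- ===== PORT A =====
def replace_even_odd_occurrences (text : String) (word : String) (even_replace : String) (odd_replace : String) : String :=
  let words := PySem.Str.split₀ text
  let res := (PySem.List.pyRange 0 (words.length : Int) 1).foldl
    (fun (st : List String × Int) i =>
      if PySem.List.pyGetD st.1 i "" = word then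
        let count := st.2 + 1
        if PySem.Int.mod count 2 = 0 then (PySem.List.pySetD st.1 i even_replace, count)
        else (PySem.List.pySetD st.1 i odd_replace, count)
      else st)
    (words, 0)
  PySem.Str.join " " res.1

-- ===== PORT B =====
-- arithmetic facts the recursion's termination cites
theorem pvFloordiv_two (n : Nat) : PySem.Int.floordiv (n : Int) 2 = ((n / 2 : Nat) : Int) := by
  simp [PySem.Int.floordiv, Int.fdiv_eq_ediv]

theorem pvLen_two {α : Type} (ws : List α) (h0 : ws ≠ []) (h1 : ws.length ≠ 1) :
    2 ≤ ws.length := by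
  cases ws with
  | nil => exact absurd rfl h0
  | cons a t => simp only [List.length_cons] at h1 ⊢; omega

-- port of Source B's inner 'process': divide and conquer on the word list
def pvProcess (word even_replace odd_replace : String) (ws : List String) (c : Int) :
    List String × Int :=
  if ws = [] then ([], 0)
  else if _h1 : ws.length = 1 then
    if PySem.List.pyGetD ws 0 "" = word then
      ([if PySem.Int.mod (c + 1) 2 = 0 then even_replace else odd_replace], 1)
    else ([PySem.List.pyGetD ws 0 ""], 0)
  else
    let m := PySem.Int.floordiv (ws.length : Int) 2
    let l := pvProcess word even_replace odd_replace (PySem.List.slice ws none (some m)) c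
    let r := pvProcess word even_replace odd_replace (PySem.List.slice ws (some m) none) (c + l.2)
    (l.1 ++ r.1, l.2 + r.2)
termination_by ws.length
decreasing_by
  · have h2 := pvLen_two ws (by assumption) (by assumption)
    rw [pvFloordiv_two, PySem.List.slice_to_natCast]
    simp only [List.length_take]
    omega
  · have h2 := pvLen_two ws (by assumption) (by assumption)
    rw [pvFloordiv_two, PySem.List.slice_from_natCast]
    simp only [List.length_drop]
    omega

def replace_even_odd_occurrences_alt (text : String) (word : String) (even_replace : String) (odd_replace : String) : String :=
  PySem.Str.join " " (pvProcess word even_replace odd_replace (PySem.Str.split₀ text) 0).1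

-- ===== PRECONDITION & SPEC =====
def Spec_replace_even_odd_occurrences (text : String) (word : String) (even_replace : String) (odd_replace : String) (out : String) : Prop := out = replace_even_odd_occurrences_alt text word even_replace odd_replace
instance (text : String) (word : String) (even_replace : String) (odd_replace : String) (out : String) : Decidable (Spec_replace_even_odd_occurrences text word even_replace odd_replace out) := by unfold Spec_replace_even_odd_occurrences; infer_instance

-- ===== CLAIM (what is proved, stated in full; the proofs are below) =====
def Claim_equal_replace_even_odd_occurrences : Prop := ∀ (text : String) (word : String) (even_replace : String) (odd_replace : String), Dom_replace_even_odd_occurrences text word even_replace odd_replace → Spec_replace_even_odd_occurrences text word even_replace odd_replace (replace_even_odd_occurrences text word even_replace odd_replace)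

-- ===== LEMMAS AND PROOFS =====

-- updating / reading the list at the index just past the processed prefix
theorem pvSet_len {α : Type} (pre : List α) (w v : α) (t : List α) :
    (pre ++ w :: t).set pre.length v = pre ++ v :: t := by
  induction pre with
  | nil => simp
  | cons x xs _ => simp

theorem pvGetD_len {α : Type} (pre : List α) (w : α) (t : List α) (d : α) :
    (pre ++ w :: t).getD pre.length d = w := by
  induction pre with
  | nil => simp
  | cons x xs _ => simp

-- Common specification both programs are proved to compute: replace the k-th
-- occurrence (counting from c+1) by even_replace iff k is even.
def pvGo (word even_replace odd_replace : String) : List String → Int → List String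
  | [], _ => []
  | w :: t, c =>
    if w = word then
      (if PySem.Int.mod (c + 1) 2 = 0 then even_replace else odd_replace)
        :: pvGo word even_replace odd_replace t (c + 1)
    else w :: pvGo word even_replace odd_replace t c

def pvCnt (word : String) : List String → Int
  | [] => 0
  | w :: t => (if w = word then 1 else 0) + pvCnt word t

theorem pvA_loop (word even_replace odd_replace : String) :
    ∀ (ws pre : List String) (c : Int),
      ((PySem.List.pyRange (pre.length : Int) ((pre.length : Int) + ws.length) 1).foldl
        (fun (st : List String × Int) i =>
          if PySem.List.pyGetD st.1 i "" = word then
            let count := st.2 + 1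
            if PySem.Int.mod count 2 = 0 then (PySem.List.pySetD st.1 i even_replace, count)
            else (PySem.List.pySetD st.1 i odd_replace, count)
          else st)
        (pre ++ ws, c)).1 = pre ++ pvGo word even_replace odd_replace ws c := by
  intro ws
  induction ws with
  | nil =>
    intro pre c
    rw [PySem.List.pyRange_one_eq_nil (by simp)]
    simp [pvGo]
  | cons w t ih =>
    intro pre c
    have cont : ∀ (v : String) (c' : Int),
        (List.foldl
          (fun (st : List String × Int) i =>
            if PySem.List.pyGetD st.1 i "" = word then
              let count := st.2 + 1
              if PySem.Int.mod count 2 = 0 then (PySem.List.pySetD st.1 i even_replace, count)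
              else (PySem.List.pySetD st.1 i odd_replace, count)
            else st)
          (pre ++ v :: t, c')
          (PySem.List.pyRange ((pre.length : Int) + 1) ((pre.length : Int) + ((w :: t).length : Int)) 1)).1
          = pre ++ v :: pvGo word even_replace odd_replace t c' := by
      intro v c'
      have e2 : ((pre.length : Int) + ((w :: t).length : Int))
          = (((pre ++ [v]).length : Int) + (t.length : Int)) := by
        push_cast [List.length_cons, List.length_append, List.length_nil]; ring
      have e1 : ((pre.length : Int) + 1) = ((pre ++ [v]).length : Int) := by
        push_cast [List.length_append, List.length_cons, List.length_nil]; ring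
      rw [show pre ++ v :: t = (pre ++ [v]) ++ t from by simp, e2, e1, ih (pre ++ [v]) c']
      simp
    rw [PySem.List.pyRange_one_cons (by push_cast [List.length_cons]; omega), List.foldl_cons]
    simp only [PySem.List.pyGetD_natCast, PySem.List.pySetD_natCast, pvGetD_len, pvSet_len, pvGo]
    by_cases hw : w = word
    · rw [if_pos hw, if_pos hw]
      by_cases hc : PySem.Int.mod (c + 1) 2 = 0
      · rw [if_pos hc, if_pos hc]; exact cont even_replace (c + 1)
      · rw [if_neg hc, if_neg hc]; exact cont odd_replace (c + 1)
    · rw [if_neg hw, if_neg hw]; exact cont w c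

theorem pvGo_append (word ev od : String) :
    ∀ (l r : List String) (c : Int),
      pvGo word ev od (l ++ r) c
        = pvGo word ev od l c ++ pvGo word ev od r (c + pvCnt word l) := by
  intro l
  induction l with
  | nil => intro r c; simp [pvGo, pvCnt]
  | cons w t ih =>
    intro r c
    simp only [List.cons_append, pvGo, pvCnt]
    by_cases hw : w = word
    · rw [if_pos hw, if_pos hw, ih r (c + 1)]
      have : c + 1 + pvCnt word t = c + ((if w = word then (1:Int) else 0) + pvCnt word t) := by
        rw [if_pos hw]; ring
      rw [this]
      simp
    · rw [if_neg hw, if_neg hw, ih r c]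
      have : c + pvCnt word t = c + ((if w = word then (1:Int) else 0) + pvCnt word t) := by
        rw [if_neg hw]; ring
      rw [this]
      simp

-- the divide-and-conquer recursion computes the linear spec and the occurrence count
theorem pvProcess_eq (word ev od : String) :
    ∀ (n : Nat) (ws : List String), ws.length = n → ∀ (c : Int),
      pvProcess word ev od ws c = (pvGo word ev od ws c, pvCnt word ws) := by
  intro n
  induction n using Nat.strong_induction_on with
  | _ n ih =>
    intro ws hn c
    rw [pvProcess]
    by_cases h0 : ws = []
    · subst h0; simp [pvGo, pvCnt]
    · rw [if_neg h0]
      by_cases h1 : ws.length = 1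
      · rw [dif_pos h1]
        rcases ws with _ | ⟨w, _ | _⟩ <;> simp_all [pvGo, pvCnt]
        by_cases hw : w = word
        · simp [hw]
        · simp [hw]
      · rw [dif_neg h1]
        have h2 := pvLen_two ws h0 h1
        simp only [pvFloordiv_two, PySem.List.slice_to_natCast, PySem.List.slice_from_natCast]
        have hl : (ws.take (ws.length / 2)).length < n := by
          simp only [List.length_take]; omega
        have hr : (ws.drop (ws.length / 2)).length < n := by
          simp only [List.length_drop]; omega
        rw [ih _ hl _ rfl, ih _ hr _ rfl]
        have hsplit := List.take_append_drop (ws.length / 2) ws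
        have hcnt : pvCnt word (ws.take (ws.length / 2)) = (pvProcess word ev od (ws.take (ws.length / 2)) c).2 := by
          rw [ih _ hl _ rfl]
        conv_rhs => rw [← hsplit]
        rw [pvGo_append]
        have hcl : ∀ l r : List String, pvCnt word (l ++ r) = pvCnt word l + pvCnt word r := by
          intro l r
          induction l with
          | nil => simp [pvCnt]
          | cons x xs ihx => simp [pvCnt, ihx]; ring
        rw [hcl]

-- ===== VERDICT (by name: the statement is the Claim_ definition above) =====
theorem replace_even_odd_occurrences_spec : Claim_equal_replace_even_odd_occurrences := by
  intro text word ev od _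
  unfold Spec_replace_even_odd_occurrences replace_even_odd_occurrences replace_even_odd_occurrences_alt
  have hA := pvA_loop word ev od (PySem.Str.split₀ text) [] 0
  have hB := pvProcess_eq word ev od (PySem.Str.split₀ text).length (PySem.Str.split₀ text) rfl 0
  simp at hA
  simp [hA, hB]
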